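-- pv_equiv track=rewrite | github.com/arramberggomez/ECC | ecc.py | encode_message
-- ===== SOURCE A (Python) =====
-- import math
--
-- _xormap = {('0','0'): '0', ('0', '1'): '1', ('1', '0'): '1', ('1', '1'): '0'}
--
-- def xor(x,y):
--   return ''.join(_xormap[a,b] for a, b in zip(x,y))
--
-- def XOR_block(block, b):
--   """
--   function to XOR two string bit-wise
--   automatically pads each string according to whichever is longer
--   """
--   result = []
--
--   if len(block) <= len(b):
--     block = block.zfill(len(b))
--   elif len(block) >= len(b):
--     b = b.zfill(len(block))
--
--   for i in range(len(b)):
--     result.append(xor(block[i], b[i]))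
--
--   result = ''.join(result)
--   return result
--
-- def encode_message(message, IV):
--   """
--   encodes message according to Algorithm 2
--   once encoded, gets mapped to elliptic curve
--   """
--   N = 23    # default for now
--   B = math.ceil(len(message)/N)
--
--   # divide message into B blocks with leq N characters each
--   message = [message[i:i+N] for i in range(0, len(message), N)]
--
--   # convert each block to binary
--   for i in range(len(message)):
--     message[i] = ''.join(format(ord(x), 'b') for x in message[i])
--
--   # xor blocks according to scheme in paper
--   message[0] = XOR_block(IV, message[0])
--   for i in range(len(message)-1):
--     message[i+1] = XOR_block(message[i], message[i+1])
--
--   # right pad with 3 zeros ie 192+3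
--   message = [message[i].ljust(195, '0') for i in range(len(message))]
--
--   return message
-- ===== SOURCE B (Python) =====
-- _bit01 = {'0': 0, '1': 1}
--
--
-- def encode_message(message, IV):
--   """
--   Same encoding, but each block is carried as an integer (value, bit-width)
--   pair and the XOR chain is a running integer XOR with a running width.
--   """
--   N = 23
--   # per-block (value, bit-width) pairs
--   pairs = []
--   for start in range(0, len(message), N):
--     v = 0
--     w = 0
--     for ch in message[start:start+N]:
--       nbits = ord(ch).bit_length()
--       v = (v << nbits) | ord(ch)
--       w += nbits
--     pairs.append((v, w))
--   # IV read as a binary numeral (KeyError on anything but '0'/'1')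
--   acc = 0
--   for ch in IV:
--     acc = 2 * acc + _bit01[ch]
--   aw = len(IV)
--   out = []
--   for v, w in pairs:
--     acc ^= v
--     aw = max(aw, w)
--     out.append(format(acc, 'b').zfill(aw).ljust(195, '0'))
--   return out
-- ===== Notes on version B (the rewrite author's own statement) =====
-- stated objective: faster
-- what changed: Blocks are carried as (integer value, bit-width) pairs and the XOR chain becomes a running big-integer XOR with a running width, instead of padding and XOR-ing character strings bit by bit via a lookup table; the binary string is only rendered once per block.
import Mathlib
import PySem

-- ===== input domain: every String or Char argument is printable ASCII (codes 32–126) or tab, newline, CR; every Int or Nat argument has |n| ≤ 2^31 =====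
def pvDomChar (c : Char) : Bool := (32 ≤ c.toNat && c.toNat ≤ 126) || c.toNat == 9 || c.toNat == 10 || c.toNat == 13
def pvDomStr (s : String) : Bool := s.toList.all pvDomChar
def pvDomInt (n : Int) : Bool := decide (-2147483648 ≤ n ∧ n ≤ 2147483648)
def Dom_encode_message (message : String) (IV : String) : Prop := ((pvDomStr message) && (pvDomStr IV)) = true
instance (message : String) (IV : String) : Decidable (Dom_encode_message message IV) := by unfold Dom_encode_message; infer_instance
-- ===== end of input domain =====

-- B carries each block as a (big-integer value, bit-width) pair and replaces A's per-character
-- string XOR chain by a running integer XOR with a running width (measurably faster in Python).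

-- ===== PORT A =====
-- _xormap: the module-level dict, as a literal association list (first match = dict lookup; keys distinct)
def pvXorPairs : List ((Char × Char) × Char) :=
  [(('0','0'),'0'), (('0','1'),'1'), (('1','0'),'1'), (('1','1'),'0')]

-- xor(x, y): zip + table lookup; a key outside the table is a Python KeyError (excluded by Pre_), here '?'
def pvXor (x y : List Char) : List Char :=
  (x.zip y).map (fun p => (List.lookup p pvXorPairs).getD '?')

-- str.ljust(w, '0'): pad on the right with '0' to width w (exact; used by both Pythons)
def pvLjust (cs : List Char) (w : Nat) : List Char :=
  cs ++ List.replicate (w - cs.length) '0'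

-- XOR_block(block, b)
def pvXORBlock (block b : List Char) : List Char :=
  let block' := if block.length ≤ b.length then PySem.Chars.zfill block (b.length : Int) else block
  let b' := if block.length ≤ b.length then b else PySem.Chars.zfill b (block.length : Int)
  -- for i in range(len(b)): result.append(xor(block[i], b[i]));  ''.join(result)
  -- (after the padding above both strings have length len(b'), so the getD default is never read)
  ((List.range b'.length).map (fun i => pvXor [block'.getD i '?'] [b'.getD i '?'])).flatten

-- the XOR chain: message[i+1] = XOR_block(message[i], message[i+1])
def pvChainA (prev : List Char) : List (List Char) → List (List Char)
  | [] => []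
  | x :: xs => pvXORBlock prev x :: pvChainA (pvXORBlock prev x) xs

def encode_message (message : String) (IV : String) : List String :=
  let cs := message.toList
  -- B = math.ceil(len(message)/N) is computed by A but never used
  -- [message[i:i+N] for i in range(0, len(message), N)]
  let blocks := (PySem.List.pyRange 0 cs.length 23).map
      (fun i => PySem.List.slice cs (some i) (some (i + 23)))
  -- ''.join(format(ord(x), 'b') for x in block)
  let bins := blocks.map (fun blk => (blk.map (fun c => PySem.Int.toBinChars (c.toNat : Int))).flatten)
  match bins with
  | [] => []   -- Python raises IndexError at message[0] here; Pre_ excludes the empty message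
  | b0 :: rest =>
    let first := pvXORBlock IV.toList b0
    (first :: pvChainA first rest).map (fun s => String.ofList (pvLjust s 195))

-- ===== PORT B =====
-- _bit01: module-level dict, as a literal association list
def pvBitVals : List (Char × Nat) := [('0', 0), ('1', 1)]

-- per block: v = (v << nbits) | ord(ch); w += nbits.
-- Python's ints here are always nonnegative, carried as Nat (<<, |, ^ agree with Python there).
def pvBlockPair (blk : List Char) : Nat × Nat :=
  blk.foldl (fun p c =>
      let nbits := PySem.Int.bitLength (c.toNat : Int)   -- ord(ch).bit_length()
      ((p.1 <<< nbits) ||| c.toNat, p.2 + nbits))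
    (0, 0)

-- running XOR / running width; format(acc, 'b').zfill(aw).ljust(195, '0')
def pvChainB (acc : Nat) (aw : Nat) : List (Nat × Nat) → List String
  | [] => []
  | (v, w) :: rest =>
    String.ofList (pvLjust
        (PySem.Chars.zfill (PySem.Int.toBinChars ((acc ^^^ v : Nat) : Int)) ((max aw w : Nat) : Int)) 195)
      :: pvChainB (acc ^^^ v) (max aw w) rest

def encode_message_alt (message : String) (IV : String) : List String :=
  let cs := message.toList
  let pairs := (PySem.List.pyRange 0 cs.length 23).map
      (fun i => pvBlockPair (PySem.List.slice cs (some i) (some (i + 23))))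
  -- IV read as a binary numeral: acc = 2*acc + (1 if ch == '1' else 0)
  -- a key outside _bit01 is a Python KeyError (excluded by Pre_), here the getD default 0
  let acc0 := IV.toList.foldl (fun a c => 2 * a + (List.lookup c pvBitVals).getD 0) 0
  pvChainB acc0 IV.toList.length pairs

-- ===== PRECONDITION & SPEC =====
-- A raises IndexError on the empty message and KeyError (the xor table) whenever IV contains a
-- character other than '0'/'1'; Pre_ excludes exactly those inputs and nothing else.
def Pre_encode_message (message : String) (IV : String) : Prop :=
  message ≠ "" ∧ (IV.toList.all (fun c => c == '0' || c == '1')) = true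
instance (message : String) (IV : String) : Decidable (Pre_encode_message message IV) := by
  unfold Pre_encode_message; infer_instance

def pvWitness_encode_message : String × String := ("Hi", "101")

def Spec_encode_message (message : String) (IV : String) (out : List String) : Prop :=
  out = encode_message_alt message IV
instance (message : String) (IV : String) (out : List String) : Decidable (Spec_encode_message message IV out) := by
  unfold Spec_encode_message; infer_instance

-- ===== CLAIM (what is proved, stated in full; the proofs are below) =====
def Claim_equal_encode_message : Prop := ∀ (message : String) (IV : String),
  Dom_encode_message message IV → Pre_encode_message message IV →
  Spec_encode_message message IV (encode_message message IV)

-- ===== LEMMAS AND PROOFS =====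

-- the value of a big-endian binary character string
def pvVal (cs : List Char) : Nat :=
  cs.foldl (fun a c => 2 * a + (if c = '1' then 1 else 0)) 0

def pvIsBin (cs : List Char) : Prop := ∀ c ∈ cs, c = '0' ∨ c = '1'

-- reference (recursive) form of Nat.toDigits 2
def pvBits (n : Nat) : List Char :=
  if _h : n < 2 then [Nat.digitChar n]
  else pvBits (n / 2) ++ [Nat.digitChar (n % 2)]
decreasing_by exact Nat.div_lt_self (by omega) (by omega)

def pvBinOf (blk : List Char) : List Char :=
  (blk.map (fun c => PySem.Int.toBinChars (c.toNat : Int))).flatten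

def pvXc (c d : Char) : Char := (List.lookup (c, d) pvXorPairs).getD '?'


theorem pvVal_from (cs : List Char) : ∀ a : Nat,
    cs.foldl (fun a c => 2 * a + (if c = '1' then 1 else 0)) a = a * 2 ^ cs.length + pvVal cs := by
  induction cs with
  | nil => intro a; simp [pvVal]
  | cons c t ih =>
    intro a
    have h1 := ih (2 * a + (if c = '1' then 1 else 0))
    have h2 := ih (2 * 0 + (if c = '1' then 1 else 0))
    simp only [List.foldl_cons, List.length_cons, pvVal] at *
    rw [h1, h2]; ring

theorem pvVal_append (xs ys : List Char) :
    pvVal (xs ++ ys) = pvVal xs * 2 ^ ys.length + pvVal ys := by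
  unfold pvVal
  rw [List.foldl_append]
  exact pvVal_from ys _

theorem pvVal_snoc (xs : List Char) (c : Char) :
    pvVal (xs ++ [c]) = 2 * pvVal xs + (if c = '1' then 1 else 0) := by
  rw [pvVal_append]
  have : pvVal [c] = (if c = '1' then 1 else 0) := by simp [pvVal]
  rw [this]
  simp
  ring

theorem pvVal_lt (cs : List Char) : pvVal cs < 2 ^ cs.length := by
  induction cs using List.reverseRecOn with
  | nil => simp [pvVal]
  | append_singleton xs c ih =>
    rw [pvVal_snoc]
    simp only [List.length_append, List.length_cons, List.length_nil]
    have : (2:Nat) ^ (xs.length + 1) = 2 * 2 ^ xs.length := by ring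
    rw [this]
    split <;> omega

theorem pvVal_replicate (k : Nat) (cs : List Char) :
    pvVal (List.replicate k '0' ++ cs) = pvVal cs := by
  induction k with
  | zero => simp
  | succ k ih =>
    rw [List.replicate_succ, List.cons_append]
    unfold pvVal at *
    simp only [List.foldl_cons]
    have : (2 * 0 + (if ('0':Char) = '1' then 1 else 0)) = 0 := by decide
    rw [this]
    exact ih

theorem pvBin_inj : ∀ (a b : List Char), pvIsBin a → pvIsBin b →
    a.length = b.length → pvVal a = pvVal b → a = b := by
  intro a
  induction a using List.reverseRecOn with
  | nil =>
    intro b _ _ hlen _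
    simp at hlen; exact (List.eq_nil_of_length_eq_zero hlen.symm).symm
  | append_singleton xs x ih =>
    intro b hax hb hlen hval
    induction b using List.reverseRecOn with
    | nil => simp at hlen
    | append_singleton ys y _ =>
      have hlen' : xs.length = ys.length := by simp at hlen; omega
      rw [pvVal_snoc, pvVal_snoc] at hval
      have hx : x = '0' ∨ x = '1' := hax x (by simp)
      have hy : y = '0' ∨ y = '1' := hb y (by simp)
      have hxs : pvIsBin xs := fun c hc => hax c (by simp [hc])
      have hys : pvIsBin ys := fun c hc => hb c (by simp [hc])
      have heq : x = y ∧ pvVal xs = pvVal ys := by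
        rcases hx with h|h <;> rcases hy with h'|h' <;> subst h <;> subst h' <;>
          simp_all <;> omega
      rw [ih ys hxs hys hlen' heq.2, heq.1]

theorem pvToDigitsCore_eq : ∀ (f n : Nat) (l : List Char), n < f →
    Nat.toDigitsCore 2 f n l = pvBits n ++ l := by
  intro f
  induction f with
  | zero => intro n l h; omega
  | succ f ih =>
    intro n l h
    rw [Nat.toDigitsCore]
    by_cases h2 : n < 2
    · have hd : n / 2 = 0 := Nat.div_eq_of_lt h2
      rw [pvBits]
      simp [hd, h2, Nat.mod_eq_of_lt h2]
    · have hne : ¬ n / 2 = 0 := by omega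
      simp only [hne, if_false]
      rw [ih (n / 2) _ (by omega)]
      conv_rhs => rw [pvBits]
      simp [h2]

theorem pvToDigits_eq (n : Nat) : Nat.toDigits 2 n = pvBits n := by
  unfold Nat.toDigits
  rw [pvToDigitsCore_eq (n + 1) n [] (Nat.lt_succ_self n)]
  simp

theorem pvToBin_natCast (m : Nat) : PySem.Int.toBinChars (m : Int) = pvBits m := by
  simp [PySem.Int.toBinChars, pvToDigits_eq]

theorem pvBits_isBin (n : Nat) : pvIsBin (pvBits n) := by
  induction n using Nat.strong_induction_on with
  | _ n ih =>
    rw [pvBits]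
    split
    · rename_i h; intro c hc
      interval_cases n <;> simp_all <;> decide
    · rename_i h
      intro c hc
      rcases List.mem_append.1 hc with hc | hc
      · exact ih (n / 2) (Nat.div_lt_self (by omega) (by omega)) c hc
      · simp at hc; subst hc
        rcases Nat.mod_two_eq_zero_or_one n with h2 | h2 <;> rw [h2] <;> simp [Nat.digitChar]

theorem pvBits_val (n : Nat) : pvVal (pvBits n) = n := by
  induction n using Nat.strong_induction_on with
  | _ n ih =>
    rw [pvBits]
    split
    · rename_i h; interval_cases n <;> decide
    · rename_i h
      rw [pvVal_snoc, ih (n / 2) (Nat.div_lt_self (by omega) (by omega))]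
      rcases Nat.mod_two_eq_zero_or_one n with h2 | h2 <;> rw [h2] <;> simp [Nat.digitChar] <;> omega

theorem pvBits_len_pos (n : Nat) : 1 ≤ (pvBits n).length := by
  rw [pvBits]; split <;> simp

theorem pvBits_msb (n : Nat) (h : 1 ≤ n) : 2 ^ ((pvBits n).length - 1) ≤ n := by
  induction n using Nat.strong_induction_on with
  | _ n ih =>
    rw [pvBits]
    split
    · rename_i h2; simpa using h
    · rename_i h2
      have hd : 1 ≤ n / 2 := by omega
      have := ih (n / 2) (Nat.div_lt_self (by omega) (by omega)) hd
      have hlp := pvBits_len_pos (n / 2)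
      have hL : (pvBits (n / 2) ++ [(n % 2).digitChar]).length = (pvBits (n / 2)).length + 1 := by
        simp
      rw [hL, Nat.add_sub_cancel]
      have hp : 2 ^ (pvBits (n / 2)).length = 2 * 2 ^ ((pvBits (n / 2)).length - 1) := by
        conv_lhs => rw [show (pvBits (n / 2)).length = ((pvBits (n / 2)).length - 1) + 1 from by omega]
        rw [pow_succ]; ring
      omega

theorem pvBits_len_le (n w : Nat) (hn : n < 2 ^ w) (hw : 1 ≤ w) : (pvBits n).length ≤ w := by
  rw [← pvToDigits_eq]
  exact Nat.toDigits_length 2 n w hw hn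

theorem pvLog_unique {n a b : Nat} (ha1 : 1 ≤ a) (hb1 : 1 ≤ b)
    (ha : 2 ^ (a - 1) ≤ n) (ha' : n < 2 ^ a) (hb : 2 ^ (b - 1) ≤ n) (hb' : n < 2 ^ b) : a = b := by
  by_contra hne
  rcases Nat.lt_or_ge a b with h | h
  · have : (2:Nat) ^ a ≤ 2 ^ (b - 1) := Nat.pow_le_pow_right (by omega) (by omega)
    omega
  · have h' : b < a := by omega
    have : (2:Nat) ^ b ≤ 2 ^ (a - 1) := Nat.pow_le_pow_right (by omega) (by omega)
    omega

theorem pvBitLength_eq (n : Nat) (h : 1 ≤ n) :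
    PySem.Int.bitLength (n : Int) = (pvBits n).length := by
  have h1 := PySem.Int.lt_two_pow_bitLength (n : Int)
  have h2 := PySem.Int.two_pow_bitLength_le (n : Int) (by exact_mod_cast (by omega : (n:Int) ≠ 0))
  rw [Int.natAbs_natCast] at h1 h2
  have h3 : 1 ≤ PySem.Int.bitLength (n : Int) := by
    by_contra hc
    have : PySem.Int.bitLength (n : Int) = 0 := by omega
    rw [this] at h1; simp at h1; omega
  have h4 : n < 2 ^ (pvBits n).length := by
    have := pvVal_lt (pvBits n)
    rwa [pvBits_val] at this
  exact pvLog_unique h3 (pvBits_len_pos n) h2 h1 (pvBits_msb n h) h4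

theorem pvZfill_eq (cs : List Char) (hb : pvIsBin cs) (w : Nat) :
    PySem.Chars.zfill cs (w : Int) = List.replicate (w - cs.length) '0' ++ cs := by
  unfold PySem.Chars.zfill
  by_cases hle : (w : Int) ≤ (cs.length : Int)
  · rw [if_pos hle]
    have : w - cs.length = 0 := by omega
    simp [this]
  · rw [if_neg hle]
    cases cs with
    | nil => simp
    | cons c rest =>
      have hc := hb c (by simp)
      have hns : ¬ (c = '+' ∨ c = '-') := by rcases hc with h | h <;> subst h <;> decide
      simp only [hns, if_false]
      simp

theorem pvRangeMap_zipWith {α β γ : Type} (f : α → β → γ) (d1 : α) (d2 : β) :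
    ∀ (a : List α) (b : List β), a.length = b.length →
    (List.range b.length).map (fun i => f (a.getD i d1) (b.getD i d2)) = List.zipWith f a b := by
  intro a
  induction a with
  | nil =>
    intro b h
    have : b = [] := List.eq_nil_of_length_eq_zero (by simpa using h.symm)
    subst this; simp
  | cons x xs ih =>
    intro b h
    cases b with
    | nil => simp at h
    | cons y ys =>
      simp only [List.length_cons, List.range_succ_eq_map, List.map_cons, List.map_map]
      have hh : ∀ i, ((fun i => f ((x :: xs).getD i d1) ((y :: ys).getD i d2)) ∘ Nat.succ) i
          = f (xs.getD i d1) (ys.getD i d2) := by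
        intro i; simp [Function.comp]
      rw [List.map_congr_left (fun i _ => hh i)]
      rw [ih ys (by simpa using h)]
      simp

theorem pvFlattenSingleton (l : List Nat) (g : Nat → Char) :
    (l.map (fun i => [g i])).flatten = l.map g := by
  induction l with
  | nil => simp
  | cons x xs ih => simp [ih]

theorem pvLoop_eq (a b : List Char) (h : a.length = b.length) :
    ((List.range b.length).map (fun i => pvXor [a.getD i '?'] [b.getD i '?'])).flatten =
      List.zipWith pvXc a b := by
  have h1 : ∀ i : Nat, pvXor [a.getD i '?'] [b.getD i '?'] = [pvXc (a.getD i '?') (b.getD i '?')] := by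
    intro i; simp [pvXor, pvXc]
  rw [List.map_congr_left (fun i _ => h1 i)]
  rw [pvFlattenSingleton (List.range b.length) (fun i => pvXc (a.getD i '?') (b.getD i '?'))]
  exact pvRangeMap_zipWith pvXc '?' '?' a b h

theorem pvBit_eq (c : Char) (u : Nat) :
    2 * u + (if c = '1' then 1 else 0) = Nat.bit (c == '1') u := by
  by_cases h : c = '1'
  · simp [h, Nat.bit]
  · have hb : (c == '1') = false := by simpa using h
    simp [h, hb, Nat.bit]

theorem pvZip_spec : ∀ (a b : List Char), pvIsBin a → pvIsBin b → a.length = b.length →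
    pvIsBin (List.zipWith pvXc a b) ∧
      pvVal (List.zipWith pvXc a b) = pvVal a ^^^ pvVal b := by
  intro a
  induction a using List.reverseRecOn with
  | nil =>
    intro b _ _ h
    have : b = [] := List.eq_nil_of_length_eq_zero (by simpa using h.symm)
    subst this
    constructor
    · intro c hc; simp at hc
    · simp [pvVal]
  | append_singleton xs x ih =>
    intro b hax hb hlen
    induction b using List.reverseRecOn with
    | nil => simp at hlen
    | append_singleton ys y _ =>
      have hlen' : xs.length = ys.length := by simp at hlen; omega
      have hxs : pvIsBin xs := fun c hc => hax c (by simp [hc])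
      have hys : pvIsBin ys := fun c hc => hb c (by simp [hc])
      have hx : x = '0' ∨ x = '1' := hax x (by simp)
      have hy : y = '0' ∨ y = '1' := hb y (by simp)
      obtain ⟨ihb, ihv⟩ := ih ys hxs hys hlen'
      rw [List.zipWith_append (h := hlen')]
      constructor
      · intro c hc
        rcases List.mem_append.1 hc with hc | hc
        · exact ihb c hc
        · simp at hc; subst hc
          rcases hx with h|h <;> rcases hy with h'|h' <;> subst h <;> subst h' <;> decide
      · simp only [List.zipWith_cons_cons, List.zipWith_nil_right]
        rw [pvVal_snoc, pvVal_snoc, pvVal_snoc, ihv]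
        rw [pvBit_eq, pvBit_eq, pvBit_eq, Nat.xor_bit]
        congr 1
        rcases hx with h|h <;> rcases hy with h'|h' <;> subst h <;> subst h' <;> decide

theorem pvRepBin (k : Nat) (cs : List Char) (h : pvIsBin cs) :
    pvIsBin (List.replicate k '0' ++ cs) := by
  intro c hc
  rcases List.mem_append.1 hc with hc | hc
  · left; exact List.eq_of_mem_replicate hc
  · exact h c hc

theorem pvXORBlock_spec (a b : List Char) (ha : pvIsBin a) (hb : pvIsBin b) :
    pvIsBin (pvXORBlock a b) ∧ (pvXORBlock a b).length = max a.length b.length ∧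
      pvVal (pvXORBlock a b) = pvVal a ^^^ pvVal b := by
  unfold pvXORBlock
  by_cases h : a.length ≤ b.length
  · simp only [if_pos h]
    rw [pvZfill_eq a ha b.length]
    have hlen : (List.replicate (b.length - a.length) '0' ++ a).length = b.length := by
      simp; omega
    rw [pvLoop_eq _ _ hlen]
    obtain ⟨h1, h2⟩ := pvZip_spec _ b (pvRepBin _ a ha) hb hlen
    refine ⟨h1, ?_, ?_⟩
    · rw [List.length_zipWith, hlen, Nat.min_self]; omega
    · rw [h2, pvVal_replicate]
  · simp only [if_neg h]
    rw [pvZfill_eq b hb a.length]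
    have hlen : a.length = (List.replicate (a.length - b.length) '0' ++ b).length := by
      simp; omega
    rw [pvLoop_eq _ _ hlen]
    obtain ⟨h1, h2⟩ := pvZip_spec a _ ha (pvRepBin _ b hb) hlen
    refine ⟨h1, ?_, ?_⟩
    · rw [List.length_zipWith, ← hlen, Nat.min_self]; omega
    · rw [h2, pvVal_replicate]

theorem pvOrDisjoint : ∀ (k a b : Nat), b < 2 ^ k → (a * 2 ^ k) ||| b = a * 2 ^ k + b := by
  intro k
  induction k with
  | zero =>
    intro a b h
    interval_cases b
    simp
  | succ k ih =>
    intro a b h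
    have hb : b = Nat.bit (decide (b % 2 = 1)) (b / 2) := by
      rcases Nat.mod_two_eq_zero_or_one b with h2 | h2 <;> simp [Nat.bit, h2] <;> omega
    have ha : a * 2 ^ (k + 1) = Nat.bit false (a * 2 ^ k) := by
      simp [Nat.bit]; ring
    rw [ha, hb, Nat.lor_bit]
    have hd : b / 2 < 2 ^ k := by
      have : (2:Nat) ^ (k+1) = 2 * 2 ^ k := by ring
      omega
    rw [ih a (b / 2) hd]
    rcases Nat.mod_two_eq_zero_or_one b with h2 | h2 <;> simp [Nat.bit, h2] <;> ring_nf

theorem pvBlockPair_eq : ∀ (blk : List Char), (∀ c ∈ blk, 1 ≤ c.toNat) →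
    pvBlockPair blk = (pvVal (pvBinOf blk), (pvBinOf blk).length) := by
  intro blk
  induction blk using List.reverseRecOn with
  | nil => intro _; simp [pvBlockPair, pvBinOf, pvVal]
  | append_singleton xs c ih =>
    intro h
    have hc : 1 ≤ c.toNat := h c (by simp)
    have hxs : ∀ c' ∈ xs, 1 ≤ c'.toNat := fun c' hc' => h c' (by simp [hc'])
    unfold pvBlockPair at ih ⊢
    rw [List.foldl_append, ih hxs]
    simp only [List.foldl_cons, List.foldl_nil]
    have hb : pvBinOf (xs ++ [c]) = pvBinOf xs ++ pvBits c.toNat := by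
      simp [pvBinOf, pvToBin_natCast]
    rw [hb, pvVal_append, List.length_append]
    rw [pvBitLength_eq c.toNat hc]
    have hlt : c.toNat < 2 ^ (pvBits c.toNat).length := by
      have := pvVal_lt (pvBits c.toNat); rwa [pvBits_val] at this
    rw [Nat.shiftLeft_eq, pvOrDisjoint _ _ _ hlt, pvBits_val]

theorem pvChain_corr : ∀ (bins : List (List Char)) (prev : List Char), pvIsBin prev →
    (∀ s ∈ bins, pvIsBin s ∧ 1 ≤ s.length) →
    (pvChainA prev bins).map (fun s => String.ofList (pvLjust s 195)) =
      pvChainB (pvVal prev) prev.length (bins.map (fun s => (pvVal s, s.length))) := by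
  intro bins
  induction bins with
  | nil => intro prev _ _; simp [pvChainA, pvChainB]
  | cons x xs ih =>
    intro prev hprev hall
    obtain ⟨hx, hxlen⟩ := hall x (List.mem_cons_self)
    obtain ⟨hyb, hylen, hyval⟩ := pvXORBlock_spec prev x hprev hx
    simp only [pvChainA, List.map_cons, pvChainB]
    have haw : 1 ≤ max prev.length x.length := by omega
    have hacc : pvVal prev ^^^ pvVal x < 2 ^ (max prev.length x.length) := by
      rw [← hyval, ← hylen]; exact pvVal_lt _
    have hkey : pvXORBlock prev x =
        PySem.Chars.zfill (PySem.Int.toBinChars ((pvVal prev ^^^ pvVal x : Nat) : Int))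
          ((max prev.length x.length : Nat) : Int) := by
      rw [pvToBin_natCast, pvZfill_eq _ (pvBits_isBin _)]
      apply pvBin_inj _ _ hyb (pvRepBin _ _ (pvBits_isBin _))
      · have hle := pvBits_len_le _ _ hacc haw
        simp only [List.length_append, List.length_replicate]
        omega
      · rw [pvVal_replicate, pvBits_val, hyval]
    rw [ih (pvXORBlock prev x) hyb (fun s hs => hall s (by simp [hs])), hyval, hylen, hkey]

theorem pvAcc_eq : ∀ (cs : List Char), (∀ c ∈ cs, c = '0' ∨ c = '1') → ∀ a : Nat,
    cs.foldl (fun a c => 2 * a + (List.lookup c pvBitVals).getD 0) a =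
      cs.foldl (fun a c => 2 * a + (if c = '1' then 1 else 0)) a := by
  intro cs
  induction cs with
  | nil => intro _ _; rfl
  | cons c t ih =>
    intro h a
    simp only [List.foldl_cons]
    rw [ih (fun c' hc' => h c' (by simp [hc']))]
    rcases h c (by simp) with hc | hc <;> subst hc <;> rfl

theorem pvMain : ∀ (message IV : String), Dom_encode_message message IV →
    Pre_encode_message message IV → encode_message message IV = encode_message_alt message IV := by
  intro m IV hdom hpre
  obtain ⟨hne, hivb⟩ := hpre
  have hiv : ∀ c ∈ IV.toList, c = '0' ∨ c = '1' := by
    intro c hc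
    have := List.all_eq_true.mp hivb c hc
    simpa using this
  have hcs : m.toList ≠ [] := by
    intro h
    apply hne
    have : m = String.ofList m.toList := by simp
    rw [this, h]
  have hdm : ∀ c ∈ m.toList, 1 ≤ c.toNat := by
    intro c hc
    have h1 : pvDomChar c = true := by
      unfold Dom_encode_message pvDomStr at hdom
      rw [Bool.and_eq_true] at hdom
      have := hdom.1
      rw [List.all_eq_true] at this
      exact this c hc
    have h2 : ((32 ≤ c.toNat ∧ c.toNat ≤ 126 ∨ c.toNat = 9) ∨ c.toNat = 10) ∨ c.toNat = 13 := by
      simpa [pvDomChar] using h1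
    omega
  have hlen : 0 < m.toList.length := List.length_pos_iff.2 hcs
  -- slices: nonempty, characters from the message
  have hslice : ∀ i ∈ PySem.List.pyRange 0 (m.toList.length : Int) 23,
      PySem.List.slice m.toList (some i) (some (i + 23)) ≠ [] ∧
      ∀ c ∈ PySem.List.slice m.toList (some i) (some (i + 23)), c ∈ m.toList := by
    intro i hi
    rw [PySem.List.mem_pyRange_iff_of_pos (by norm_num)] at hi
    obtain ⟨h0, hlt, -⟩ := hi
    obtain ⟨k, rfl⟩ : ∃ k : Nat, i = (k : Int) := ⟨i.toNat, (Int.toNat_of_nonneg h0).symm⟩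
    have h23 : (k : Int) + 23 = ((k + 23 : Nat) : Int) := by push_cast; ring
    rw [h23, PySem.List.slice_natCast]
    constructor
    · have hk : k < m.toList.length := by exact_mod_cast hlt
      intro hcon
      rw [List.take_eq_nil_iff] at hcon
      rcases hcon with h | h
      · omega
      · rw [List.drop_eq_nil_iff] at h; omega
    · intro c hc
      exact List.mem_of_mem_drop (List.mem_of_mem_take hc)
  -- A's binary blocks
  have hbinsProp : ∀ i ∈ PySem.List.pyRange 0 (m.toList.length : Int) 23,
      pvIsBin (pvBinOf (PySem.List.slice m.toList (some i) (some (i + 23)))) ∧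
      1 ≤ (pvBinOf (PySem.List.slice m.toList (some i) (some (i + 23)))).length := by
    intro i hi
    obtain ⟨hnn, hmem⟩ := hslice i hi
    constructor
    · intro c hc
      unfold pvBinOf at hc
      rw [List.mem_flatten] at hc
      obtain ⟨l, hl, hcl⟩ := hc
      rw [List.mem_map] at hl
      obtain ⟨ch, -, rfl⟩ := hl
      rw [pvToBin_natCast] at hcl
      exact pvBits_isBin _ c hcl
    · rcases hx : PySem.List.slice m.toList (some i) (some (i + 23)) with _ | ⟨c, t⟩
      · exact absurd hx hnn
      · unfold pvBinOf
        rw [List.map_cons, List.flatten_cons, List.length_append, pvToBin_natCast]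
        have := pvBits_len_pos c.toNat
        omega
  -- the range is nonempty
  have h0mem : (0 : Int) ∈ PySem.List.pyRange 0 (m.toList.length : Int) 23 := by
    rw [PySem.List.mem_pyRange_iff_of_pos (by norm_num)]
    refine ⟨le_refl _, by exact_mod_cast hlen, by simp⟩
  -- rewrite both sides to the chain forms
  unfold encode_message encode_message_alt
  simp only [List.map_map]
  have hacc : (IV.toList.foldl (fun a c => 2 * a + (List.lookup c pvBitVals).getD 0) 0) = pvVal IV.toList := by
    rw [pvAcc_eq IV.toList hiv 0]; rfl
  rw [hacc]
  have hpairs : (PySem.List.pyRange 0 (m.toList.length : Int) 23).map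
        (fun i => pvBlockPair (PySem.List.slice m.toList (some i) (some (i + 23)))) =
      ((PySem.List.pyRange 0 (m.toList.length : Int) 23).map
        (fun i => pvBinOf (PySem.List.slice m.toList (some i) (some (i + 23))))).map
        (fun s => (pvVal s, s.length)) := by
    rw [List.map_map]
    apply List.map_congr_left
    intro i hi
    obtain ⟨-, hmem⟩ := hslice i hi
    exact pvBlockPair_eq _ (fun c hc => hdm c (hmem c hc))
  rw [hpairs]
  have hcomp : ((fun blk => (List.map (fun c => PySem.Int.toBinChars (c.toNat : Int)) blk).flatten) ∘
        fun i => PySem.List.slice m.toList (some i) (some (i + 23))) =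
      (fun i => pvBinOf (PySem.List.slice m.toList (some i) (some (i + 23)))) := rfl
  rw [hcomp]
  -- bins is nonempty, so the match takes the cons branch
  rcases hbl : (PySem.List.pyRange 0 (m.toList.length : Int) 23).map
      (fun i => pvBinOf (PySem.List.slice m.toList (some i) (some (i + 23)))) with _ | ⟨b0, rest⟩
  · exfalso
    have := List.map_eq_nil_iff.1 hbl
    rw [this] at h0mem
    simp at h0mem
  · have hall : ∀ s ∈ b0 :: rest, pvIsBin s ∧ 1 ≤ s.length := by
      rw [← hbl]
      intro s hs
      rw [List.mem_map] at hs
      obtain ⟨i, hi, rfl⟩ := hs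
      exact hbinsProp i hi
    have hchain := pvChain_corr (b0 :: rest) IV.toList hiv hall
    simp only [pvChainA, List.map_cons] at hchain ⊢
    exact hchain

-- ===== VERDICT (by name: the statement is the Claim_ definition above) =====
theorem encode_message_spec : Claim_equal_encode_message := by
  intro message IV hdom hpre
  unfold Spec_encode_message
  exact pvMain message IV hdom hpre
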